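-- pv_equiv track=rewrite | github.com/lisabash/Bashkirova_Zonal_OR_2023 | hic/plot_HiC_ChIP_correlation_matrix.py | get_genomic_order
-- ===== SOURCE A (Python) =====
-- def get_genomic_order(chrs, loci):
--     chr_to_entries = {}
--     chr_order = [str(i) for i in range(1, 20)]
--     chr_order.append("X")
--     chr_order.append("Y")
--     for chr in chr_order:
--         chr_to_entries[chr] = []
--     for (i, (chr, locus)) in enumerate(zip(chrs, loci)):
--         chr_to_entries[chr].append((chr, locus, i))
--     entries = []
--     for chr in chr_order:
--         entries.extend(sorted(chr_to_entries[chr], key=lambda x: x[1]))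
--     order = [x[2] for x in entries]
--     return order
-- ===== SOURCE B (Python) =====
-- def get_genomic_order(chrs, loci):
--     chr_order = [str(i) for i in range(1, 20)] + ["X", "Y"]
--     rank = {c: r for r, c in enumerate(chr_order)}
--     n = min(len(chrs), len(loci))
--     return sorted(range(n), key=lambda i: (rank[chrs[i]], loci[i]))
-- ===== Notes on version B (the rewrite author's own statement) =====
-- stated objective: simpler
-- what changed: Replaces the 21-bucket dict (pre-seeded per-chromosome lists, per-bucket sorts, concatenation) by one stable sort of the index range under the composite key (chromosome rank, locus), with ranks from a single dict comprehension.
import Mathlib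
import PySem

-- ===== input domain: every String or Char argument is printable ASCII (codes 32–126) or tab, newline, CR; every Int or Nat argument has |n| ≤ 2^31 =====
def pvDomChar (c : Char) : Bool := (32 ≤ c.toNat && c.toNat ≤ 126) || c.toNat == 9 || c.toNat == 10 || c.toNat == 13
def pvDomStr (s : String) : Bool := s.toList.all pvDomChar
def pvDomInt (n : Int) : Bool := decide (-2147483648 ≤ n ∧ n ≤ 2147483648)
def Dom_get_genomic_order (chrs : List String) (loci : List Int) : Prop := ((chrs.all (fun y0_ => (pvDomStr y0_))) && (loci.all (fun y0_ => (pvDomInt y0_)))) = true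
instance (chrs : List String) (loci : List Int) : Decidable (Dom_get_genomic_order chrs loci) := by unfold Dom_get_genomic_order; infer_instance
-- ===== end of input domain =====

-- B replaces A's 21 pre-seeded dict buckets + per-bucket sorts + concatenation by one stable
-- sort of the index range keyed by (chromosome rank, locus); equality of the returned list is
-- proved on Pre_ (all zipped chromosome names among "1".."19","X","Y"; elsewhere both raise KeyError).

-- ===== PORT A =====
def get_genomic_order (chrs : List String) (loci : List Int) : List Int :=
  let chr_order : List String := (PySem.List.pyRange 1 20).map PySem.Int.toStr ++ ["X"] ++ ["Y"]
  let d0 : PySem.Dict String (List (String × Int × Int)) :=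
    chr_order.foldl (fun d c => d.insert c []) PySem.Dict.empty
  -- chr_to_entries[chr].append(...) raises KeyError for a chr outside chr_order (excluded by Pre_);
  -- Dict.modify with default [] is exact on keys present in the dict.
  let d : PySem.Dict String (List (String × Int × Int)) :=
    (PySem.List.enumerate (chrs.zip loci)).foldl
      (fun d p => d.modify p.2.1 [] (fun xs => xs ++ [(p.2.1, p.2.2, p.1)])) d0
  let entries : List (String × Int × Int) :=
    chr_order.foldl (fun acc c => acc ++ PySem.List.sorted (d.getD c []) (fun x => x.2.1)) []
  entries.map (fun x => x.2.2)

-- ===== PORT B =====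
def get_genomic_order_alt (chrs : List String) (loci : List Int) : List Int :=
  let chr_order : List String := (PySem.List.pyRange 1 20).map PySem.Int.toStr ++ ["X", "Y"]
  let rank : PySem.Dict String Int :=
    (PySem.List.enumerate chr_order).foldl (fun d p => d.insert p.2 p.1) PySem.Dict.empty
  let n : Int := min (chrs.length : Int) (loci.length : Int)
  -- rank[chrs[i]] raises KeyError for a chr outside chr_order (excluded by Pre_);
  -- indices i of range(n) are in bounds, so the getD/pyGetD defaults are unreachable under Pre_.
  PySem.List.sorted2 (PySem.List.pyRange 0 n)
    (fun i => rank.getD (PySem.List.pyGetD chrs i "") (-1))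
    (fun i => PySem.List.pyGetD loci i 0)

-- ===== PRECONDITION & SPEC =====
def pvChrNames : List String :=
  ["1","2","3","4","5","6","7","8","9","10","11","12","13","14","15","16","17","18","19","X","Y"]

-- Pre_ excludes exactly the inputs on which A raises KeyError: a zipped entry whose
-- chromosome name is not one of "1".."19","X","Y".
def Pre_get_genomic_order (chrs : List String) (loci : List Int) : Prop :=
  ∀ p ∈ chrs.zip loci, p.1 ∈ pvChrNames
instance (chrs : List String) (loci : List Int) : Decidable (Pre_get_genomic_order chrs loci) := by
  unfold Pre_get_genomic_order; infer_instance

def pvWitness_get_genomic_order : List String × List Int := (["X", "1", "1", "19"], [5, 7, 7, -2])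

def Spec_get_genomic_order (chrs : List String) (loci : List Int) (out : List Int) : Prop := out = get_genomic_order_alt chrs loci
instance (chrs : List String) (loci : List Int) (out : List Int) : Decidable (Spec_get_genomic_order chrs loci out) := by unfold Spec_get_genomic_order; infer_instance

-- ===== CLAIM (what is proved, stated in full; the proofs are below) =====
def Claim_equal_get_genomic_order : Prop := ∀ (chrs : List String) (loci : List Int), Dom_get_genomic_order chrs loci → Pre_get_genomic_order chrs loci → Spec_get_genomic_order chrs loci (get_genomic_order chrs loci)

-- ===== LEMMAS AND PROOFS =====

-- proof-side vocabulary -------------------------------------------------------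
def pvTriple (p : Int × String × Int) : String × Int × Int := (p.2.1, p.2.2, p.1)

def pvEn (chrs : List String) (loci : List Int) : List (Int × String × Int) :=
  PySem.List.enumerate (chrs.zip loci)

def pvBucket (chrs : List String) (loci : List Int) (c : String) : List (String × Int × Int) :=
  ((pvEn chrs loci).map pvTriple).filter (fun t => t.1 == c)

def pvRank (c : String) : Int :=
  ((PySem.List.enumerate ((PySem.List.pyRange 1 20).map PySem.Int.toStr ++ ["X", "Y"])).foldl
    (fun d p => d.insert p.2 p.1) PySem.Dict.empty).getD c (-1)

def pvKey1 (chrs : List String) (i : Int) : Int := pvRank (PySem.List.pyGetD chrs i "")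
def pvKey2 (loci : List Int) (i : Int) : Int := PySem.List.pyGetD loci i 0

-- the (strict) lexicographic order "by K1, then K2, then position idx"
def pvS {α : Type} (K1 K2 idx : α → Int) (a b : α) : Prop :=
  K1 a < K1 b ∨ (K1 a = K1 b ∧ (K2 a < K2 b ∨ (K2 a = K2 b ∧ idx a < idx b)))

def pvR (chrs : List String) (loci : List Int) : Int → Int → Prop :=
  pvS (pvKey1 chrs) (pvKey2 loci) (fun i => i)

-- small rfl equations ---------------------------------------------------------
theorem pv_insertBy_nil {α : Type} (bf : α → α → Bool) (x : α) :
    PySem.List.insertBy bf x [] = [x] := rfl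

theorem pv_insertBy_cons {α : Type} (bf : α → α → Bool) (x y : α) (ys : List α) :
    PySem.List.insertBy bf x (y :: ys) =
      if bf x y then x :: y :: ys else y :: PySem.List.insertBy bf x ys := rfl

theorem pv_en_nil {α : Type} (s : Int) : PySem.List.enumerate ([] : List α) s = [] := rfl

theorem pv_en_cons {α : Type} (x : α) (t : List α) (s : Int) :
    PySem.List.enumerate (x :: t) s = (s, x) :: PySem.List.enumerate t (s + 1) := rfl

theorem pv_sorted2_eq {α : Type} (xs : List α) (k1 k2 : α → Int) :
    PySem.List.sorted2 xs k1 k2 =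
      xs.foldl (fun acc x => PySem.List.insertBy
        (fun a b => decide (k1 a < k1 b) || (!decide (k1 b < k1 a) && decide (k2 a < k2 b))) x acc) [] := rfl

theorem pv_names_eq :
    ((PySem.List.pyRange 1 20).map PySem.Int.toStr ++ ["X"] ++ ["Y"]) = pvChrNames := by decide

-- the insertion-sort stability lemma -----------------------------------------
theorem pv_insert_pairwise {α : Type} (K1 K2 idx : α → Int) (before : α → α → Bool)
    (hb : ∀ a b, before a b = true ↔ (K1 a < K1 b ∨ (K1 a = K1 b ∧ K2 a < K2 b)))
    (x : α) (acc : List α) (hp : acc.Pairwise (pvS K1 K2 idx))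
    (hidx : ∀ a ∈ acc, idx a < idx x) :
    (PySem.List.insertBy before x acc).Pairwise (pvS K1 K2 idx) := by
  induction acc with
  | nil =>
    rw [pv_insertBy_nil]; exact List.pairwise_singleton _ _
  | cons y ys ih =>
    rw [pv_insertBy_cons]
    rcases List.pairwise_cons.mp hp with ⟨hy, hys⟩
    by_cases h : before x y = true
    · rw [if_pos h]
      have hxy := (hb x y).mp h
      refine List.pairwise_cons.mpr ⟨?_, hp⟩
      intro z hz
      rcases List.mem_cons.mp hz with rfl | hz
      · simp only [pvS]; omega
      · have hyz := hy z hz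
        simp only [pvS] at hyz ⊢; omega
    · rw [if_neg h]
      have hxy : ¬ (K1 x < K1 y ∨ (K1 x = K1 y ∧ K2 x < K2 y)) := fun hc => h ((hb x y).mpr hc)
      have hidxy : idx y < idx x := hidx y (List.mem_cons_self ..)
      refine List.pairwise_cons.mpr
        ⟨?_, ih hys (fun a ha => hidx a (List.mem_cons_of_mem _ ha))⟩
      intro z hz
      rcases (PySem.List.mem_insertBy before x z ys).mp hz with rfl | hz
      · simp only [pvS]; omega
      · exact hy z hz

theorem pv_fold_pairwise {α : Type} (K1 K2 idx : α → Int) (before : α → α → Bool)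
    (hb : ∀ a b, before a b = true ↔ (K1 a < K1 b ∨ (K1 a = K1 b ∧ K2 a < K2 b))) :
    ∀ (xs acc : List α), acc.Pairwise (pvS K1 K2 idx) →
      (∀ a ∈ acc, ∀ x ∈ xs, idx a < idx x) →
      xs.Pairwise (fun a b => idx a < idx b) →
      (xs.foldl (fun acc x => PySem.List.insertBy before x acc) acc).Pairwise (pvS K1 K2 idx) := by
  intro xs
  induction xs with
  | nil => intro acc hp _ _; exact hp
  | cons x t ih =>
    intro acc hp hcross hxs
    rcases List.pairwise_cons.mp hxs with ⟨hx, ht⟩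
    rw [List.foldl_cons]
    refine ih _ ?_ ?_ ht
    · exact pv_insert_pairwise K1 K2 idx before hb x acc hp
        (fun a ha => hcross a ha x (List.mem_cons_self ..))
    · intro a ha z hz
      rcases (PySem.List.mem_insertBy before x a acc).mp ha with rfl | ha
      · exact hx z hz
      · exact hcross a ha z (List.mem_cons_of_mem _ hz)

-- dictionary characterisations ------------------------------------------------
theorem pv_d0_getD :
    ∀ (l : List String) (d : PySem.Dict String (List (String × Int × Int))),
      (∀ c, d.getD c [] = []) →
      ∀ c, (l.foldl (fun d c => d.insert c []) d).getD c [] = [] := by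
  intro l
  induction l with
  | nil => intro d h c; exact h c
  | cons x t ih =>
    intro d h c
    rw [List.foldl_cons]
    refine ih _ (fun c' => ?_) c
    rw [PySem.Dict.getD_insert]
    split
    · rfl
    · exact h c'

theorem pv_dict_getD :
    ∀ (ps : List (Int × String × Int)) (d : PySem.Dict String (List (String × Int × Int))) (c : String),
      ((ps.foldl (fun d p => d.modify p.2.1 [] (fun xs => xs ++ [(p.2.1, p.2.2, p.1)])) d).getD c [])
        = d.getD c [] ++ (ps.filter (fun p => p.2.1 == c)).map pvTriple := by
  intro ps
  induction ps with
  | nil => intro d c; simp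
  | cons p t ih =>
    intro d c
    rw [List.foldl_cons, ih, List.filter_cons]
    unfold PySem.Dict.modify
    rw [PySem.Dict.getD_insert]
    by_cases h : c = p.2.1
    · subst h
      simp [pvTriple]
    · have hbeq : (p.2.1 == c) = false := by simp [Ne.symm h]
      simp [hbeq, h]

-- A rewritten as a flatMap over the buckets ------------------------------------
theorem pv_A_eq (chrs : List String) (loci : List Int) :
    get_genomic_order chrs loci =
      (pvChrNames.flatMap (fun c =>
        PySem.List.sorted (pvBucket chrs loci c) (fun t => t.2.1))).map (fun t => t.2.2) := by
  simp only [get_genomic_order]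
  rw [pv_names_eq, PySem.List.foldl_append_eq_flatMap, List.nil_append]
  have hd : ∀ c,
      (((PySem.List.enumerate (chrs.zip loci)).foldl
          (fun d p => d.modify p.2.1 [] (fun xs => xs ++ [(p.2.1, p.2.2, p.1)]))
          (pvChrNames.foldl (fun d c => d.insert c []) PySem.Dict.empty)).getD c [])
        = pvBucket chrs loci c := by
    intro c
    rw [pv_dict_getD, pv_d0_getD pvChrNames PySem.Dict.empty (fun _ => rfl) c, List.nil_append]
    unfold pvBucket pvEn
    rw [List.filter_map]
    rfl
  have hfun : (fun c => PySem.List.sorted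
        ((((PySem.List.enumerate (chrs.zip loci)).foldl
          (fun d p => d.modify p.2.1 [] (fun xs => xs ++ [(p.2.1, p.2.2, p.1)]))
          (pvChrNames.foldl (fun d c => d.insert c []) PySem.Dict.empty))).getD c []) (fun x => x.2.1))
      = (fun c => PySem.List.sorted (pvBucket chrs loci c) (fun t => t.2.1)) :=
    funext (fun c => by rw [hd c])
  rw [hfun]

-- bucket concatenation is a permutation of all entries -------------------------
theorem pv_perm_insert (t : String × Int × Int) (ts : List (String × Int × Int)) :
    ∀ (l : List String), l.Nodup → t.1 ∈ l →
      (l.flatMap (fun c => (t :: ts).filter (fun u => u.1 == c))).Perm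
        (t :: l.flatMap (fun c => ts.filter (fun u => u.1 == c))) := by
  intro l
  induction l with
  | nil => intro _ h; simp at h
  | cons c l' ih =>
    intro hnd hmem
    rcases List.nodup_cons.mp hnd with ⟨hc, hnd'⟩
    rw [List.flatMap_cons, List.flatMap_cons, List.filter_cons]
    by_cases h : t.1 = c
    · have hbeq : (t.1 == c) = true := by simp [h]
      have hnotin : t.1 ∉ l' := h ▸ hc
      have hrest : l'.flatMap (fun c' => (t :: ts).filter (fun u => u.1 == c'))
          = l'.flatMap (fun c' => ts.filter (fun u => u.1 == c')) := by
        refine List.flatMap_congr (fun c' hc' => ?_)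
        have : (t.1 == c') = false := by
          simp only [beq_eq_false_iff_ne, ne_eq]
          exact fun hh => hnotin (hh ▸ hc')
        rw [List.filter_cons, this]
        simp
      rw [hrest, hbeq]
      simp
    · have hbeq : (t.1 == c) = false := by simp [h]
      rw [hbeq]
      simp only [Bool.false_eq_true, if_false]
      have hmem' : t.1 ∈ l' := by
        rcases List.mem_cons.mp hmem with h' | h'
        · exact absurd h' h
        · exact h'
      exact (List.Perm.append_left _ (ih hnd' hmem')).trans List.perm_middle

theorem pv_perm_buckets :
    ∀ (ts : List (String × Int × Int)) (l : List String), l.Nodup → (∀ t ∈ ts, t.1 ∈ l) →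
      (l.flatMap (fun c => ts.filter (fun u => u.1 == c))).Perm ts := by
  intro ts
  induction ts with
  | nil => intro l _ _; simp
  | cons t ts ih =>
    intro l hnd h
    exact (pv_perm_insert t ts l hnd (h t (List.mem_cons_self ..))).trans
      ((ih l hnd (fun u hu => h u (List.mem_cons_of_mem _ hu))).cons t)

-- enumerate facts --------------------------------------------------------------
theorem pv_en_get {α : Type} :
    ∀ (xs : List α) (s : Int) (p : Int × α), p ∈ PySem.List.enumerate xs s →
      ∃ k : Nat, p.1 = s + k ∧ xs[k]? = some p.2 := by
  intro xs
  induction xs with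
  | nil => intro s p h; rw [pv_en_nil] at h; simp at h
  | cons x t ih =>
    intro s p h
    rw [pv_en_cons] at h
    rcases List.mem_cons.mp h with rfl | h'
    · exact ⟨0, by simp⟩
    · rcases ih (s + 1) p h' with ⟨k, hk1, hk2⟩
      refine ⟨k + 1, ?_, by simpa using hk2⟩
      push_cast
      omega

theorem pv_en_pairwise {α : Type} :
    ∀ (xs : List α) (s : Int),
      (PySem.List.enumerate xs s).Pairwise (fun p q => p.1 < q.1) := by
  intro xs
  induction xs with
  | nil => intro s; rw [pv_en_nil]; exact List.Pairwise.nil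
  | cons x t ih =>
    intro s
    rw [pv_en_cons]
    refine List.pairwise_cons.mpr ⟨?_, ih (s + 1)⟩
    intro q hq
    rcases pv_en_get t (s + 1) q hq with ⟨k, hk, -⟩
    simp only
    omega

theorem pv_en_fst {α : Type} :
    ∀ (xs : List α) (s : Int),
      (PySem.List.enumerate xs s).map Prod.fst
        = (List.range xs.length).map (fun k : Nat => s + (k : Int)) := by
  intro xs
  induction xs with
  | nil => intro s; rw [pv_en_nil]; simp
  | cons x t ih =>
    intro s
    rw [pv_en_cons, List.map_cons, ih (s + 1), List.length_cons,
      List.range_succ_eq_map, List.map_cons, List.map_map]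
    refine congrArg₂ _ (by simp) ?_
    refine List.map_congr_left (fun a _ => ?_)
    simp only [Function.comp_apply, Nat.succ_eq_add_one]
    push_cast
    ring

-- membership shapes ------------------------------------------------------------
theorem pv_mem_en (chrs : List String) (loci : List Int) (p : Int × String × Int)
    (hp : p ∈ pvEn chrs loci) :
    PySem.List.pyGetD chrs p.1 "" = p.2.1 ∧ PySem.List.pyGetD loci p.1 0 = p.2.2
      ∧ p.2 ∈ chrs.zip loci := by
  rcases pv_en_get (chrs.zip loci) 0 p hp with ⟨k, hk1, hk2⟩
  have hk1' : p.1 = (k : Int) := by omega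
  rcases List.getElem?_eq_some_iff.mp hk2 with ⟨hlt, hEq⟩
  have hkc : k < chrs.length := by rw [List.length_zip] at hlt; omega
  have hkl : k < loci.length := by rw [List.length_zip] at hlt; omega
  have hz : (chrs.zip loci)[k] = (chrs[k], loci[k]) := List.getElem_zip
  have h1 : chrs[k] = p.2.1 := by rw [hz] at hEq; exact congrArg Prod.fst hEq
  have h2 : loci[k] = p.2.2 := by rw [hz] at hEq; exact congrArg Prod.snd hEq
  refine ⟨?_, ?_, ?_⟩
  · rw [hk1', PySem.List.pyGetD_natCast, List.getD_eq_getElem _ _ hkc, h1]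
  · rw [hk1', PySem.List.pyGetD_natCast, List.getD_eq_getElem _ _ hkl, h2]
  · rw [← hEq]; exact List.getElem_mem hlt

theorem pv_mem_bucket (chrs : List String) (loci : List Int) (c : String)
    (t : String × Int × Int) (ht : t ∈ pvBucket chrs loci c) :
    t.1 = c ∧ pvKey1 chrs t.2.2 = pvRank c ∧ pvKey2 loci t.2.2 = t.2.1 := by
  rcases List.mem_filter.mp ht with ⟨hmem, hbeq⟩
  have htc : t.1 = c := by simpa using hbeq
  rcases List.mem_map.mp hmem with ⟨p, hp, hpt⟩
  rcases pv_mem_en chrs loci p hp with ⟨h1, h2, -⟩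
  subst hpt
  refine ⟨htc, ?_, ?_⟩
  · show pvRank (PySem.List.pyGetD chrs p.1 "") = pvRank c
    simp only [pvTriple] at htc
    rw [h1, htc]
  · show PySem.List.pyGetD loci p.1 0 = p.2.2
    exact h2

theorem pv_bucket_pairwise (chrs : List String) (loci : List Int) (c : String) :
    (pvBucket chrs loci c).Pairwise (fun a b => a.2.2 < b.2.2) := by
  refine List.Pairwise.filter _ ?_
  refine List.pairwise_map.mpr ?_
  refine (pv_en_pairwise (chrs.zip loci) 0).imp ?_
  intro a b h
  exact h

-- rank facts -------------------------------------------------------------------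
theorem pv_rank_pairwise : pvChrNames.Pairwise (fun c c' => pvRank c < pvRank c') := by decide

theorem pv_names_nodup : pvChrNames.Nodup := by decide

-- B unfolded -------------------------------------------------------------------
theorem pv_B_eq (chrs : List String) (loci : List Int) :
    get_genomic_order_alt chrs loci =
      PySem.List.sorted2 (PySem.List.pyRange 0 (min (chrs.length : Int) (loci.length : Int)))
        (pvKey1 chrs) (pvKey2 loci) := rfl

theorem pv_pyRange_pairwise (n : Nat) :
    (PySem.List.pyRange 0 (n : Int)).Pairwise (fun a b : Int => a < b) := by
  rw [PySem.List.pyRange_zero_natCast]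
  exact List.pairwise_map.mpr (List.pairwise_lt_range.imp (fun h => by exact_mod_cast h))

-- pairwise facts for the two outputs --------------------------------------------
theorem pv_B_pairwise (chrs : List String) (loci : List Int) :
    (get_genomic_order_alt chrs loci).Pairwise (pvR chrs loci) := by
  rw [pv_B_eq, pv_sorted2_eq]
  have hn : (min (chrs.length : Int) (loci.length : Int)) = ((min chrs.length loci.length : Nat) : Int) := by
    rw [Nat.cast_min]
  rw [hn]
  refine pv_fold_pairwise (pvKey1 chrs) (pvKey2 loci) (fun i => i) _ ?_ _ [] List.Pairwise.nil
    (by intro a ha; simp at ha) (pv_pyRange_pairwise _)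
  intro a b
  simp only [Bool.or_eq_true, Bool.and_eq_true, Bool.not_eq_true', decide_eq_true_eq,
    decide_eq_false_iff_not]
  omega

theorem pv_A_pairwise (chrs : List String) (loci : List Int) :
    (get_genomic_order chrs loci).Pairwise (pvR chrs loci) := by
  rw [pv_A_eq]
  refine List.pairwise_map.mpr ?_
  rw [List.flatMap_def]
  refine List.pairwise_flatten.mpr ⟨?_, ?_⟩
  · intro l hl
    rcases List.mem_map.mp hl with ⟨c, -, rfl⟩
    have hsorted : (PySem.List.sorted (pvBucket chrs loci c) (fun t => t.2.1)).Pairwise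
        (pvS (fun t => t.2.1) (fun _ => 0) (fun t => t.2.2)) := by
      rw [PySem.List.sorted_eq_foldl_insertBy]
      refine pv_fold_pairwise _ _ _ _ ?_ _ [] List.Pairwise.nil
        (by intro a ha; simp at ha) (pv_bucket_pairwise chrs loci c)
      intro a b
      simp only [decide_eq_true_eq]
      omega
    refine hsorted.imp_of_mem ?_
    intro a b ha hb hab
    have ha' := (PySem.List.mem_sorted _ _ _ _).mp ha
    have hb' := (PySem.List.mem_sorted _ _ _ _).mp hb
    rcases pv_mem_bucket chrs loci c a ha' with ⟨-, ha1, ha2⟩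
    rcases pv_mem_bucket chrs loci c b hb' with ⟨-, hb1, hb2⟩
    simp only [pvR, pvS] at hab ⊢
    omega
  · refine List.pairwise_map.mpr ?_
    refine pv_rank_pairwise.imp_of_mem ?_
    intro c c' _ _ hlt a ha b hb
    rcases pv_mem_bucket chrs loci c a ((PySem.List.mem_sorted _ _ _ _).mp ha) with ⟨-, ha1, -⟩
    rcases pv_mem_bucket chrs loci c' b ((PySem.List.mem_sorted _ _ _ _).mp hb) with ⟨-, hb1, -⟩
    simp only [pvR, pvS]
    omega

-- permutation facts --------------------------------------------------------------
theorem pv_A_perm (chrs : List String) (loci : List Int)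
    (hpre : Pre_get_genomic_order chrs loci) :
    (get_genomic_order chrs loci).Perm
      (PySem.List.pyRange 0 ((min chrs.length loci.length : Nat) : Int)) := by
  rw [pv_A_eq]
  have hmemnames : ∀ t ∈ (pvEn chrs loci).map pvTriple, t.1 ∈ pvChrNames := by
    intro t ht
    rcases List.mem_map.mp ht with ⟨p, hp, rfl⟩
    rcases pv_mem_en chrs loci p hp with ⟨-, -, hz⟩
    exact hpre p.2 hz
  have hperm1 : (pvChrNames.flatMap (fun c =>
        PySem.List.sorted (pvBucket chrs loci c) (fun t => t.2.1))).Perm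
      ((pvEn chrs loci).map pvTriple) := by
    refine (List.Perm.flatMap (List.Perm.refl pvChrNames) (fun c _ => PySem.List.sorted_perm _ _ _)).trans ?_
    exact pv_perm_buckets ((pvEn chrs loci).map pvTriple) pvChrNames pv_names_nodup hmemnames
  refine (hperm1.map (fun t => t.2.2)).trans ?_
  have hmap : (((pvEn chrs loci).map pvTriple).map (fun t => t.2.2)) = (pvEn chrs loci).map Prod.fst := by
    rw [List.map_map]; rfl
  rw [hmap]
  unfold pvEn
  rw [pv_en_fst (chrs.zip loci) 0, List.length_zip, PySem.List.pyRange_zero_natCast]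
  exact List.Perm.of_eq (List.map_congr_left (fun a _ => by simp))

theorem pv_B_perm (chrs : List String) (loci : List Int) :
    (get_genomic_order_alt chrs loci).Perm
      (PySem.List.pyRange 0 ((min chrs.length loci.length : Nat) : Int)) := by
  rw [pv_B_eq]
  have hn : (min (chrs.length : Int) (loci.length : Int)) = ((min chrs.length loci.length : Nat) : Int) := by
    rw [Nat.cast_min]
  rw [hn]
  exact PySem.List.sorted2_perm _ _ _ _

-- ===== VERDICT (by name: the statement is the Claim_ definition above) =====
theorem get_genomic_order_spec : Claim_equal_get_genomic_order := by
  intro chrs loci _ hpre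
  unfold Spec_get_genomic_order
  refine List.Perm.eq_of_pairwise ?_ (pv_A_pairwise chrs loci) (pv_B_pairwise chrs loci)
    ((pv_A_perm chrs loci hpre).trans (pv_B_perm chrs loci).symm)
  intro a b _ _ hab hba
  simp only [pvR, pvS] at hab hba
  omega
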